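-- pv_equiv track=rewrite | github.com/Asplund-Samuelsson/POPPY | poppy_KEGG_helpers.py | KEGG_rest_dict
-- ===== SOURCE A (Python) =====
-- def KEGG_rest_dict(kegg_text):
--     """
--     Parses a KEGG rest text record into a dictionary. Accepts a single record,
--     as it stops after the first '///'.
--     """
--
--     kegg_dict = {}
--
--     for line in kegg_text.split("\n"):
--         if line == "///":
--             # The first entry ends here
--             break
--         if not line.startswith(" "):
--             line = line.split()
--             key = line[0]
--             line = line[1:]
--             try:
--                 kegg_dict[key].extend(line)
--             except KeyError:
--                 kegg_dict[key] = line
--         else: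
--             try:
--                 kegg_dict[key].extend(line.split())
--             except NameError:
--                 s_err("Warning: KEGG text line '%s' has no key." % line)
--
--     return kegg_dict
-- ===== SOURCE B (Python) =====
-- def KEGG_rest_dict(kegg_text):
--     """
--     Parses a KEGG rest text record into a dictionary. Accepts a single record,
--     as it stops after the first '///'.
--
--     Two-pass rewrite: first group the lines into an ordered list of
--     (key, token-list) records, then merge the records into the dictionary.
--     """
--
--     # Pass 1: a non-indented line opens a new group, an indented line
--     # extends the last group's token list.
--     groups = []
--     for line in kegg_text.split("\n"):
--         if line == "///":
--             break
--         if not line.startswith(" "):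
--             tokens = line.split()
--             groups.append((tokens[0], tokens[1:]))
--         elif groups:
--             groups[-1][1].extend(line.split())
--         # else: an indented line before any key line carries no key; it is
--         # skipped (A calls the undefined s_err there and raises NameError).
--
--     # Pass 2: merge the groups, accumulating repeated keys in encounter order.
--     kegg_dict = {}
--     for key, tokens in groups:
--         kegg_dict.setdefault(key, []).extend(tokens)
--     return kegg_dict
-- ===== Notes on version B (the rewrite author's own statement) =====
-- stated objective: alternative
-- what changed: A's single stateful loop (dict + dangling last-key variable, try/except control flow) is replaced by a two-pass design: pass 1 groups the lines into an ordered list of (key, token-list) records, pass 2 merges the records into the dict with setdefault/extend.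
-- crash fix: On records whose first line before '///' starts with a space, A raises NameError (its warning helper s_err is undefined in the module); B skips such keyless lines and returns the dictionary built from the remaining lines. — e.g. on KEGG_rest_dict(" orphan\nKEY a\n///"): A raises NameError, B returns [("KEY", ["a"])]
import Mathlib
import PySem

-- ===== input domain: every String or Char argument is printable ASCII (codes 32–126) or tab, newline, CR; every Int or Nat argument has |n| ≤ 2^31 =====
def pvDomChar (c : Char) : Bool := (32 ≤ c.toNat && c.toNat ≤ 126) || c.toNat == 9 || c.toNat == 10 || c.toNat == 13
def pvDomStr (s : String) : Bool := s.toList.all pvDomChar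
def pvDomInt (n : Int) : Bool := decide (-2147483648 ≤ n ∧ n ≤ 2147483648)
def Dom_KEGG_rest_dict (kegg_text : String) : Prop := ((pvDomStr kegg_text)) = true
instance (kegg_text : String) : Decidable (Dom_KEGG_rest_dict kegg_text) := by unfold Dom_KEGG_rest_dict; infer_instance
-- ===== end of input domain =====

-- B replaces A's single stateful loop (dict + last-key variable, try/except) by a
-- grouping pass into ordered (key, tokens) records followed by a merge pass;
-- same return value, no speed claim.

-- ===== PORT A =====
-- A's loop: state = dict so far + optional last key; stops at '///'.
-- On a blank non-indented line Python raises IndexError, and on an indented line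
-- before any key line the (undefined) s_err call raises NameError: those returns
-- of `d` below are mere totality guards, excluded by Pre_.
def KEGG_aux (lines : List String) (d : PySem.Dict String (List String))
    (key : Option String) : PySem.Dict String (List String) :=
  match lines with
  | [] => d
  | line :: rest =>
    if line = "///" then d
    else if PySem.Str.startswith line " " = false then
      match PySem.Str.split₀ line with
      | [] => d  -- Python: IndexError on line[0] (outside Pre_)
      | k :: toks =>
        match d.get? k with
        | some v => KEGG_aux rest (d.insert k (v ++ toks)) (some k)
        | none => KEGG_aux rest (d.insert k toks) (some k)
    else
      match key with
      | some k =>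
        match d.get? k with
        | some v => KEGG_aux rest (d.insert k (v ++ PySem.Str.split₀ line)) (some k)
        | none => d  -- Python: KeyError escapes (unreachable: a set key is in the dict)
      | none => d  -- Python: NameError from the undefined s_err (outside Pre_)

def KEGG_rest_dict (kegg_text : String) : List (String × List String) :=
  (KEGG_aux ((PySem.Str.split? kegg_text "\n").getD []) PySem.Dict.empty none).items

-- ===== PORT B =====
-- pass 1 helper: groups[-1][1].extend(tokens)
def pvExtendLast : List (String × List String) → List String → List (String × List String)
  | [], _ => []
  | [(k, v)], t => [(k, v ++ t)]
  | p :: q :: rest, t => p :: pvExtendLast (q :: rest) t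

-- pass 1: build the ordered (key, token-list) groups, stopping at '///'
def pvPass1 (lines : List String) (groups : List (String × List String)) :
    List (String × List String) :=
  match lines with
  | [] => groups
  | line :: rest =>
    if line = "///" then groups
    else if PySem.Str.startswith line " " = false then
      match PySem.Str.split₀ line with
      | [] => groups  -- Python: IndexError on tokens[0] (outside Pre_)
      | k :: toks => pvPass1 rest (groups ++ [(k, toks)])
    else if groups = [] then pvPass1 rest groups  -- keyless leading line: skipped
    else pvPass1 rest (pvExtendLast groups (PySem.Str.split₀ line))

-- pass 2: kegg_dict.setdefault(key, []).extend(tokens)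
def pvMerge (groups : List (String × List String)) (d : PySem.Dict String (List String)) :
    PySem.Dict String (List String) :=
  match groups with
  | [] => d
  | (k, t) :: rest => pvMerge rest (d.insert k (d.getD k [] ++ t))

def KEGG_rest_dict_alt (kegg_text : String) : List (String × List String) :=
  (pvMerge (pvPass1 ((PySem.Str.split? kegg_text "\n").getD []) []) PySem.Dict.empty).items

-- ===== PRECONDITION & SPEC =====
-- Pre_ excludes exactly the inputs on which the Python A raises: a blank (or
-- whitespace-only) non-indented line before '///' (IndexError on line[0]), and a
-- line indented with ' ' before any key line (NameError: s_err is undefined).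
def Pre_KEGG_rest_dict (kegg_text : String) : Prop :=
  (∀ l ∈ (((PySem.Str.split? kegg_text "\n").getD []).takeWhile (fun l => l ≠ "///")),
      PySem.Str.startswith l " " = false → PySem.Str.split₀ l ≠ []) ∧
  (∀ l ∈ (((PySem.Str.split? kegg_text "\n").getD []).takeWhile (fun l => l ≠ "///")).take 1,
      PySem.Str.startswith l " " = false)
instance (kegg_text : String) : Decidable (Pre_KEGG_rest_dict kegg_text) := by
  unfold Pre_KEGG_rest_dict; infer_instance

def pvWitness_KEGG_rest_dict : String :=
  "ENTRY C00001\nNAME Water\n  H2O\nNAME Agua\n///\nJUNK after"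

-- A raises NameError (its warning helper s_err is undefined) on records whose first
-- line before '///' starts with a space; B skips such keyless lines and returns the
-- dictionary of the remaining lines.
def Raises_KEGG_rest_dict (kegg_text : String) : Prop :=
  (∃ l ∈ (((PySem.Str.split? kegg_text "\n").getD []).takeWhile (fun l => l ≠ "///")).take 1,
      PySem.Str.startswith l " " = true) ∧
  (∀ l ∈ (((PySem.Str.split? kegg_text "\n").getD []).takeWhile (fun l => l ≠ "///")),
      PySem.Str.startswith l " " = false → PySem.Str.split₀ l ≠ [])
instance (kegg_text : String) : Decidable (Raises_KEGG_rest_dict kegg_text) := by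
  unfold Raises_KEGG_rest_dict; infer_instance

def pvRaiseWitness_KEGG_rest_dict : String := "  orphan\nKEY a\n///"
def pvRaiseWitnessOut_KEGG_rest_dict : List (String × List String) := [("KEY", ["a"])]

def Spec_KEGG_rest_dict (kegg_text : String) (out : List (String × List String)) : Prop :=
  out = KEGG_rest_dict_alt kegg_text
instance (kegg_text : String) (out : List (String × List String)) :
    Decidable (Spec_KEGG_rest_dict kegg_text out) := by unfold Spec_KEGG_rest_dict; infer_instance

-- ===== CLAIM (what is proved, stated in full; the proofs are below) =====
def Claim_equal_KEGG_rest_dict : Prop := ∀ (kegg_text : String), Dom_KEGG_rest_dict kegg_text → Pre_KEGG_rest_dict kegg_text → Spec_KEGG_rest_dict kegg_text (KEGG_rest_dict kegg_text)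

def Claim_raises_KEGG_rest_dict : Prop := (∀ (kegg_text : String), Dom_KEGG_rest_dict kegg_text → Raises_KEGG_rest_dict kegg_text → ¬ Pre_KEGG_rest_dict kegg_text) ∧ (Dom_KEGG_rest_dict (pvRaiseWitness_KEGG_rest_dict) ∧ Raises_KEGG_rest_dict (pvRaiseWitness_KEGG_rest_dict) ∧ KEGG_rest_dict_alt (pvRaiseWitness_KEGG_rest_dict) = pvRaiseWitnessOut_KEGG_rest_dict)

-- ===== LEMMAS AND PROOFS =====

theorem insert_insert_self {κ ν : Type} [BEq κ] [LawfulBEq κ]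
    (d : PySem.Dict κ ν) (k : κ) (a b : ν) :
    (d.insert k a).insert k b = d.insert k b := by
  unfold PySem.Dict.insert PySem.Dict.contains
  by_cases hc : d.items.any (fun p => p.1 == k) = true
  · have h2 : ((List.map (fun p : κ × ν => if (p.1 == k) = true then (k, a) else p) d.items).any
        (fun p => p.1 == k)) = true := by
      rcases List.any_eq_true.1 hc with ⟨p, hp, hpk⟩
      exact List.any_eq_true.2 ⟨(k, a), List.mem_map.2 ⟨p, hp, by simp [hpk]⟩, by simp⟩
    simp only [hc, if_true, h2]
    congr 1
    rw [List.map_map]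
    apply List.map_congr_left
    intro p _
    by_cases h : (p.1 == k) = true <;> simp [h]
  · have hmap : ∀ c : ν, List.map (fun p : κ × ν => if (p.1 == k) = true then (k, c) else p) d.items = d.items := by
      intro c
      apply List.map_congr_left ?_ |>.trans (List.map_id _)
      intro p hp
      have : (p.1 == k) = false := by
        by_contra h
        exact hc (List.any_eq_true.2 ⟨p, hp, by simpa using h⟩)
      simp [this]
    have h2 : ((d.items ++ [(k, a)]).any (fun p => p.1 == k)) = true := by simp
    rw [if_neg hc, if_neg hc, if_pos h2]
    simp [hmap b]

-- proof-only reformulation of pass 1 with the open (last) group as explicit state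
def pvRun : List String → String × List String → List (String × List String)
  | [], c => [c]
  | line :: rest, c =>
    if line = "///" then [c]
    else if PySem.Str.startswith line " " = false then
      match PySem.Str.split₀ line with
      | [] => [c]
      | k :: toks => c :: pvRun rest (k, toks)
    else pvRun rest (c.1, c.2 ++ PySem.Str.split₀ line)

theorem pvExtendLast_append (gs : List (String × List String)) (k : String)
    (v t : List String) : pvExtendLast (gs ++ [(k, v)]) t = gs ++ [(k, v ++ t)] := by
  induction gs with
  | nil => rfl
  | cons p gs ih =>
    cases gs with
    | nil => rfl
    | cons q gs' => simpa [pvExtendLast] using ih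

theorem pvPass1_append (lines : List String) :
    ∀ (gs : List (String × List String)) (c : String × List String),
      pvPass1 lines (gs ++ [c]) = gs ++ pvRun lines c := by
  induction lines with
  | nil => intro gs c; rfl
  | cons line rest ih =>
    intro gs c
    by_cases hb : line = "///"
    · simp [pvPass1, pvRun, hb]
    · by_cases hs : PySem.Str.startswith line " " = false
      · rcases hsp : PySem.Str.split₀ line with _ | ⟨k, toks⟩
        · have hs' : PySem.Chars.startswith line.toList [' '] = false := by simpa using hs
          simp [pvPass1, pvRun, hb, hs', hsp]
        · have := ih (gs ++ [c]) (k, toks)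
          simp only [pvPass1, pvRun, hb, hs, hsp]
          simp only [List.append_assoc] at this ⊢
          simpa using this
      · have hne : gs ++ [c] ≠ [] := by simp
        obtain ⟨k, v⟩ := c
        simp only [pvPass1, pvRun, if_neg hb]
        simp only [Bool.not_eq_false] at hs
        simp only [hs, Bool.true_eq_false, if_false, if_neg hne, pvExtendLast_append]
        exact ih gs (k, v ++ PySem.Str.split₀ line)

-- the loop invariant: A's dict already contains the open group merged in
theorem keggAux_eq_merge_run (lines : List String)
    (hpre : ∀ l ∈ lines.takeWhile (fun l => l ≠ "///"),
      PySem.Str.startswith l " " = false → PySem.Str.split₀ l ≠ []) :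
    ∀ (k : String) (t : List String) (d : PySem.Dict String (List String)),
      KEGG_aux lines (d.insert k (d.getD k [] ++ t)) (some k) =
        pvMerge (pvRun lines (k, t)) d := by
  induction lines with
  | nil => intro k t d; rfl
  | cons line rest ih =>
    intro k t d
    by_cases hb : line = "///"
    · simp [KEGG_aux, pvRun, hb, pvMerge]
    · have htw : (line :: rest).takeWhile (fun l => l ≠ "///") =
          line :: rest.takeWhile (fun l => l ≠ "///") := by
        rw [List.takeWhile_cons, if_pos (by simpa using hb)]
      have hmem : line ∈ (line :: rest).takeWhile (fun l => l ≠ "///") := by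
        rw [htw]; exact List.mem_cons_self
      have hrest : ∀ l ∈ rest.takeWhile (fun l => l ≠ "///"),
          PySem.Str.startswith l " " = false → PySem.Str.split₀ l ≠ [] := by
        intro l hl
        exact hpre l (by rw [htw]; exact List.mem_cons_of_mem _ hl)
      by_cases hs : PySem.Str.startswith line " " = false
      · rcases hsp : PySem.Str.split₀ line with _ | ⟨k', toks⟩
        · exact absurd hsp (hpre line hmem hs)
        · have hstep : ∀ (D : PySem.Dict String (List String)),
              (match D.get? k' with
                | some v => KEGG_aux rest (D.insert k' (v ++ toks)) (some k')
                | none => KEGG_aux rest (D.insert k' toks) (some k')) =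
              KEGG_aux rest (D.insert k' (D.getD k' [] ++ toks)) (some k') := by
            intro D
            rcases hg : D.get? k' with _ | v
            · simp [PySem.Dict.getD_eq_get?_getD, hg]
            · simp [PySem.Dict.getD_eq_get?_getD, hg]
          simp only [KEGG_aux, if_neg hb, hs, hsp, hstep, pvRun]
          exact ih hrest k' toks (d.insert k (d.getD k [] ++ t))
      · simp only [Bool.not_eq_false] at hs
        have hget : (d.insert k (d.getD k [] ++ t)).get? k = some (d.getD k [] ++ t) :=
          PySem.Dict.get?_insert_self d k _
        simp only [KEGG_aux, if_neg hb, hs, Bool.true_eq_false, if_false, hget, pvRun]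
        rw [insert_insert_self, List.append_assoc]
        exact ih hrest k (t ++ PySem.Str.split₀ line) d

-- ===== VERDICT (by name: the statement is the Claim_ definition above) =====
theorem KEGG_rest_dict_spec : Claim_equal_KEGG_rest_dict := by
  intro t _ hpre
  obtain ⟨h1, h2⟩ := hpre
  unfold Spec_KEGG_rest_dict KEGG_rest_dict KEGG_rest_dict_alt
  congr 1
  rcases hL : (PySem.Str.split? t "\n").getD [] with _ | ⟨line, rest⟩
  · rfl
  · rw [hL] at h1 h2
    by_cases hb : line = "///"
    · simp [KEGG_aux, pvPass1, hb, pvMerge]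
    · have htw : (line :: rest).takeWhile (fun l => l ≠ "///") =
          line :: rest.takeWhile (fun l => l ≠ "///") := by
        rw [List.takeWhile_cons, if_pos (by simpa using hb)]
      have hmem : line ∈ (line :: rest).takeWhile (fun l => l ≠ "///") := by
        rw [htw]; exact List.mem_cons_self
      have hs : PySem.Str.startswith line " " = false :=
        h2 line (by rw [htw]; simp)
      have hrest : ∀ l ∈ rest.takeWhile (fun l => l ≠ "///"),
          PySem.Str.startswith l " " = false → PySem.Str.split₀ l ≠ [] := by
        intro l hl
        exact h1 l (by rw [htw]; exact List.mem_cons_of_mem _ hl)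
      rcases hsp : PySem.Str.split₀ line with _ | ⟨k, toks⟩
      · exact absurd hsp (h1 line hmem hs)
      · have hA : (PySem.Dict.empty : PySem.Dict String (List String)).get? k = none :=
          PySem.Dict.get?_empty k
        have hins : (PySem.Dict.empty : PySem.Dict String (List String)).insert k toks =
            PySem.Dict.empty.insert k (PySem.Dict.empty.getD k [] ++ toks) := by
          simp [PySem.Dict.getD_empty]
        simp only [KEGG_aux, pvPass1, if_neg hb, hs, hsp, hA, hins, if_true, List.nil_append]
        rw [show pvPass1 rest [(k, toks)] = [] ++ pvRun rest (k, toks) from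
          pvPass1_append rest [] (k, toks), List.nil_append]
        exact keggAux_eq_merge_run rest hrest k toks PySem.Dict.empty

theorem KEGG_rest_dict_raises : Claim_raises_KEGG_rest_dict := by
  unfold Claim_raises_KEGG_rest_dict
  exact ⟨by
    intro t _ hr hp
    obtain ⟨⟨l, hl, hls⟩, _⟩ := hr
    exact absurd (hp.2 l hl) (by simpa using hls), by decide⟩

-- self-check: the raise witness really lies inside Raises_ (read off the theorem above)
theorem pvRaiseWitness_ok : Raises_KEGG_rest_dict pvRaiseWitness_KEGG_rest_dict :=
  KEGG_rest_dict_raises.2.2.1
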